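-- pv_equiv track=rewrite | github.com/centroid-is/tfc-hmi | tools/tfc-orchestrator/orchestrator/gsd.py | _parse_ui_review_output
-- ===== SOURCE A (Python) =====
-- def _parse_ui_review_output(stdout: str) -> tuple[bool, list[str]]:
--     """Parse UI review output. Returns (passed, findings)."""
--     text = stdout.strip()
--     if text.startswith('PASS'):
--         return True, []
--
--     findings = []
--     in_findings = False
--     for line in text.split('\n'):
--         stripped = line.strip()
--         if 'FINDINGS' in stripped:
--             in_findings = True
--             continue
--         if in_findings and stripped and stripped.startswith('-'):
--             findings.append(stripped.lstrip('- '))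
--         elif in_findings and stripped:
--             findings.append(stripped)
--
--     if not findings and 'FINDINGS' in text:
--         findings.append('Unspecified UI findings')
--
--     return False, findings
-- ===== SOURCE B (Python) =====
-- def _parse_ui_review_output(stdout: str) -> tuple[bool, list[str]]:
--     """Parse UI review output. Returns (passed, findings)."""
--     text = stdout.strip()
--     if text.startswith('PASS'):
--         return True, []
--     stripped = [ln.strip() for ln in text.split('\n')]
--     idx = next((i for i, s in enumerate(stripped) if 'FINDINGS' in s), None)
--     if idx is None:
--         findings = []
--     else:
--         findings = [s.lstrip('- ') if s.startswith('-') else s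
--                     for s in stripped[idx + 1:]
--                     if s and 'FINDINGS' not in s]
--     if not findings and 'FINDINGS' in text:
--         findings = ['Unspecified UI findings']
--     return False, findings
-- ===== Notes on version B (the rewrite author's own statement) =====
-- stated objective: alternative
-- what changed: Replaces A's single stateful fold with an in_findings flag by a locate-then-slice decomposition: strip all lines once, find the index of the first FINDINGS line, and build the findings by a filter+map comprehension over the slice after it.
import Mathlib
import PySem

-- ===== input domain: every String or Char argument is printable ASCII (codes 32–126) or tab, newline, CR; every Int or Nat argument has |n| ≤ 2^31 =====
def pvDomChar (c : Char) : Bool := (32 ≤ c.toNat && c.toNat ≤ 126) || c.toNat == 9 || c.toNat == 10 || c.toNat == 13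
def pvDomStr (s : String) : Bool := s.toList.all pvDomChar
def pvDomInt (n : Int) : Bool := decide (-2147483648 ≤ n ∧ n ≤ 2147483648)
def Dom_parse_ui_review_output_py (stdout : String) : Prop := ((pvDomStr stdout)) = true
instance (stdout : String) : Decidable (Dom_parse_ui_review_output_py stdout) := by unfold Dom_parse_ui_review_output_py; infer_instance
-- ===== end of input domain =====

-- B replaces A's stateful in_findings fold by locate-the-first-FINDINGS-line then a filter+map over the slice after it (alternative decomposition, same cost).

-- shared primitive helpers (Python built-ins both versions call):
-- s.lstrip('- '): drop leading '-' and ' ' characters (exact)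
def pyLstripDashSpace (s : String) : String :=
  String.ofList (s.toList.dropWhile (fun c => c == '-' || c == ' '))
-- 'FINDINGS' in s
def pvHasFindings (s : String) : Bool := PySem.Str.isIn "FINDINGS" s
-- s.startswith('-')
def pvDash (s : String) : Bool := PySem.Str.startswith s "-"

-- ===== PORT A =====
def pvAStep (st : Bool × List String) (line : String) : Bool × List String :=
  let stripped := PySem.Str.strip line
  if pvHasFindings stripped then (true, st.2)
  else if st.1 && !(stripped == "") && pvDash stripped then
    (st.1, st.2 ++ [pyLstripDashSpace stripped])
  else if st.1 && !(stripped == "") then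
    (st.1, st.2 ++ [stripped])
  else st

def parse_ui_review_output_py (stdout : String) : Bool × List String :=
  let text := PySem.Str.strip stdout
  if PySem.Str.startswith text "PASS" then (true, [])
  else
    -- .getD []: '\n' is a non-empty separator, so split? never returns none
    let st := ((PySem.Str.split? text "\n").getD []).foldl pvAStep (false, [])
    let findings :=
      if st.2.isEmpty && pvHasFindings text then st.2 ++ ["Unspecified UI findings"]
      else st.2
    (false, findings)

-- ===== PORT B =====
def pvBKeep (s : String) : Bool := !(s == "") && !(pvHasFindings s)

def pvBFmt (s : String) : String := if pvDash s then pyLstripDashSpace s else s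

def parse_ui_review_output_py_alt (stdout : String) : Bool × List String :=
  let text := PySem.Str.strip stdout
  if PySem.Str.startswith text "PASS" then (true, [])
  else
    let stripped := ((PySem.Str.split? text "\n").getD []).map PySem.Str.strip
    let findings :=
      match stripped.findIdx? (fun s => pvHasFindings s) with
      | none => []
      | some i => ((stripped.drop (i + 1)).filter pvBKeep).map pvBFmt
    let findings :=
      if findings.isEmpty && pvHasFindings text then ["Unspecified UI findings"]
      else findings
    (false, findings)

-- ===== PRECONDITION & SPEC =====
def Spec_parse_ui_review_output_py (stdout : String) (out : Bool × List String) : Prop := out = parse_ui_review_output_py_alt stdout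
instance (stdout : String) (out : Bool × List String) : Decidable (Spec_parse_ui_review_output_py stdout out) := by unfold Spec_parse_ui_review_output_py; infer_instance

-- ===== CLAIM (what is proved, stated in full; the proofs are below) =====
def Claim_equal_parse_ui_review_output_py : Prop := ∀ (stdout : String), Dom_parse_ui_review_output_py stdout → Spec_parse_ui_review_output_py stdout (parse_ui_review_output_py stdout)

-- ===== LEMMAS AND PROOFS =====

-- once the flag is true, A's fold appends exactly B's filter+map of the stripped tail
theorem pvA_fold_true (lines : List String) (acc : List String) :
    lines.foldl pvAStep (true, acc)
      = (true, acc ++ ((lines.map PySem.Str.strip).filter pvBKeep).map pvBFmt) := by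
  induction lines generalizing acc with
  | nil => simp
  | cons l t ih =>
    simp only [List.foldl_cons, List.map_cons, List.filter_cons]
    by_cases hF : pvHasFindings (PySem.Str.strip l) = true
    · simp [pvAStep, pvBKeep, hF, ih]
    · by_cases hE : PySem.Str.strip l = ""
      · simp [pvAStep, pvBKeep, hE, ih]
      · by_cases hD : pvDash (PySem.Str.strip l) = true
        · simp [pvAStep, pvBKeep, pvBFmt, hF, hE, hD, ih]
        · simp [pvAStep, pvBKeep, pvBFmt, hF, hE, hD, ih]

-- A's fold from the initial state, characterized through B's findIdx? decomposition
theorem pvA_fold_false (lines : List String) :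
    lines.foldl pvAStep (false, [])
      = (match (lines.map PySem.Str.strip).findIdx? (fun s => pvHasFindings s) with
         | none => ((false : Bool), ([] : List String))
         | some i => (true, (((lines.map PySem.Str.strip).drop (i + 1)).filter pvBKeep).map pvBFmt)) := by
  induction lines with
  | nil => simp
  | cons l t ih =>
    simp only [List.foldl_cons, List.map_cons, List.findIdx?_cons]
    by_cases hF : pvHasFindings (PySem.Str.strip l) = true
    · simp [pvAStep, hF, pvA_fold_true]
    · have hstep : pvAStep (false, []) l = (false, []) := by
        simp [pvAStep, hF]
      rw [hstep, ih]
      cases h : (t.map PySem.Str.strip).findIdx? (fun s => pvHasFindings s) with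
      | none => simp [hF]
      | some i => simp [hF, List.drop_succ_cons]

-- ===== VERDICT (by name: the statement is the Claim_ definition above) =====
theorem parse_ui_review_output_py_spec : Claim_equal_parse_ui_review_output_py := by
  intro stdout _
  unfold Spec_parse_ui_review_output_py parse_ui_review_output_py parse_ui_review_output_py_alt
  by_cases hP : PySem.Str.startswith (PySem.Str.strip stdout) "PASS" = true
  · rw [if_pos hP, if_pos hP]
  · rw [if_neg hP, if_neg hP, pvA_fold_false]
    generalize pvHasFindings (PySem.Str.strip stdout) = C
    generalize ((PySem.Str.split? (PySem.Str.strip stdout) "\n").getD []).map PySem.Str.strip = L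
    cases h : L.findIdx? (fun s => pvHasFindings s) with
    | none => simp [h]
    | some i =>
      simp only [h]
      split_ifs with hc
      · have hnil : List.filter pvBKeep (List.drop (i + 1) L) = [] := by
          rw [Bool.and_eq_true, List.isEmpty_iff, List.map_eq_nil_iff] at hc
          exact hc.1
        simp [hnil]
      · rfl
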